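-- pv_equiv track=rewrite | github.com/Lovecatsnyou/PPP_25-26_1sem | 2lab/main.py | map_letters_by_frequency
-- ===== SOURCE A (Python) =====
-- from collections import Counter
--
-- def map_letters_by_frequency(s1, s2):
--     freq1 = Counter(s1)
--     freq2 = Counter(s2)
--     letters1 = {}
--     letters2 = {}
--     for k, v in freq1.items():
--         letters1.setdefault(v, []).append(k)
--     for k, v in freq2.items():
--         letters2.setdefault(v, []).append(k)
--     freq_pairs = sorted(set(letters1) & set(letters2), reverse=True)
--     mapping = []
--     for freq in freq_pairs:
--         l1 = sorted(letters1[freq])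
--         l2 = sorted(letters2[freq])
--         if len(l1) != len(l2):
--             return "Некорректное отображение: неоднозначные частоты или недостаток символов."
--         for x, y in zip(l1, l2):
--             mapping.append(f"{x}={y}")
--     unmapped_freq1 = set(letters1) - set(letters2)
--     unmapped_freq2 = set(letters2) - set(letters1)
--     if unmapped_freq1 or unmapped_freq2:
--         return "Некорректное отображение: несовпадающие частоты символов."
--     return " ".join(mapping)
-- ===== SOURCE B (Python) =====
-- from collections import Counter
--
--
-- def map_letters_by_frequency(s1, s2):
--     # Two-pointer merge of the two (letter,count) lists, each sorted by
--     # (descending count, ascending letter).  No frequency->letters dict,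
--     # no grouping, no set algebra: pairs are emitted in lockstep, a ragged
--     # end of a common-frequency block is the ambiguity error, and any
--     # skipped (unshared-frequency) entry flags the mismatch error.
--     p1 = sorted(Counter(s1).items(), key=lambda kv: (-kv[1], kv[0]))
--     p2 = sorted(Counter(s2).items(), key=lambda kv: (-kv[1], kv[0]))
--     tokens = []
--     mismatch = False
--     while p1 and p2:
--         (x, c1), (y, c2) = p1[0], p2[0]
--         if c1 == c2:
--             tokens.append(f"{x}={y}")
--             p1, p2 = p1[1:], p2[1:]
--             if bool(p1 and p1[0][1] == c1) != bool(p2 and p2[0][1] == c1):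
--                 return "Некорректное отображение: неоднозначные частоты или недостаток символов."
--         elif c1 > c2:
--             mismatch = True
--             p1 = p1[1:]
--         else:
--             mismatch = True
--             p2 = p2[1:]
--     if mismatch or p1 or p2:
--         return "Некорректное отображение: несовпадающие частоты символов."
--     return " ".join(tokens)
-- ===== Notes on version B (the rewrite author's own statement) =====
-- stated objective: alternative
-- what changed: A builds two frequency->letters dicts, intersects/differences their key sets and looks up each common frequency; B sorts each Counter's (letter,count) pairs once by (-count, letter) and runs a single two-pointer merge over the two sorted lists, pairing equal-count heads in lockstep, flagging a mismatch on any skipped entry and detecting ambiguity as a ragged end of a common-count run.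
import Mathlib
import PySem

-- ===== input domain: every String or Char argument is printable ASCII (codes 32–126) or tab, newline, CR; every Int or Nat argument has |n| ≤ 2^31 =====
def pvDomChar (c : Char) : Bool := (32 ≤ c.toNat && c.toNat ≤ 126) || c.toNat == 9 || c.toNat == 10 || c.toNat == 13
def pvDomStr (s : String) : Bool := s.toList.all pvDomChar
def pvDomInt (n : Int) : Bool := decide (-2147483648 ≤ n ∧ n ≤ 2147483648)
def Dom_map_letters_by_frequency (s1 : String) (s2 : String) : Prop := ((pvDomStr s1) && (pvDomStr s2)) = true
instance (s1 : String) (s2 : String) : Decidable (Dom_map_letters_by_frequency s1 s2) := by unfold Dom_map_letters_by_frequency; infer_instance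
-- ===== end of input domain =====

-- B replaces A's frequency->letters dicts, per-frequency lookups and set algebra by a
-- single two-pointer merge of the two (letter,count) lists sorted by (-count, letter)
-- (objective: alternative).

-- ===== PORT A =====
def pvMsgAmb : String := "Некорректное отображение: неоднозначные частоты или недостаток символов."
def pvMsgMis : String := "Некорректное отображение: несовпадающие частоты символов."

-- A's 'for freq in freq_pairs' loop with its early return; the []-case is A's code after
-- the loop.  'letters1[freq]' is ported as getD (freq is drawn from the intersection of
-- the key sets, so the Python lookup never raises; getD is exact there).
def pvLoopA (letters1 letters2 : PySem.Dict Int (List Char)) :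
    List Int → List String → String
  | [], mapping =>
    if PySem.Set.diff (PySem.Set.ofList letters1.keys) (PySem.Set.ofList letters2.keys) ≠ [] ∨
       PySem.Set.diff (PySem.Set.ofList letters2.keys) (PySem.Set.ofList letters1.keys) ≠ [] then
      pvMsgMis
    else PySem.Str.join " " mapping
  | freq :: rest, mapping =>
    let l1 := PySem.List.sorted (letters1.getD freq []) (fun x => x) false
    let l2 := PySem.List.sorted (letters2.getD freq []) (fun x => x) false
    if l1.length ≠ l2.length then pvMsgAmb
    else pvLoopA letters1 letters2 rest
      ((l1.zip l2).foldl (fun acc xy => acc ++ [String.ofList [xy.1, '=', xy.2]]) mapping)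

def map_letters_by_frequency (s1 : String) (s2 : String) : String :=
  let freq1 := PySem.Dict.counter s1.toList
  let freq2 := PySem.Dict.counter s2.toList
  let letters1 := freq1.items.foldl
    (fun d kv => d.modify kv.2 [] (· ++ [kv.1])) PySem.Dict.empty
  let letters2 := freq2.items.foldl
    (fun d kv => d.modify kv.2 [] (· ++ [kv.1])) PySem.Dict.empty
  let freq_pairs := PySem.List.sorted
    (PySem.Set.inter (PySem.Set.ofList letters1.keys) (PySem.Set.ofList letters2.keys))
    (fun x => x) true
  pvLoopA letters1 letters2 freq_pairs []

-- ===== PORT B =====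
-- bool(p and p[0][1] == c)
def pvHeadFreq : List (Char × Int) → Int → Bool
  | [], _ => false
  | kv :: _, f => kv.2 == f

-- Source B's while loop over the two suffixes; the two non-loop cases are Source B's code after
-- the loop ('if mismatch or p1 or p2', with the impossible disjunct of an empty suffix dropped).
def pvMergeB : List (Char × Int) → List (Char × Int) → List String → Bool → String
  | (x, c1) :: t1, (y, c2) :: t2, tokens, mm =>
    if c1 == c2 then
      let tokens' := tokens ++ [String.ofList [x, '=', y]]
      if pvHeadFreq t1 c1 != pvHeadFreq t2 c1 then pvMsgAmb
      else pvMergeB t1 t2 tokens' mm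
    else if c1 > c2 then pvMergeB t1 ((y, c2) :: t2) tokens true
    else pvMergeB ((x, c1) :: t1) t2 tokens true
  | [], p2, tokens, mm =>
    if mm || !p2.isEmpty then pvMsgMis else PySem.Str.join " " tokens
  | p1, [], tokens, mm =>
    if mm || !p1.isEmpty then pvMsgMis else PySem.Str.join " " tokens
termination_by p1 p2 => p1.length + p2.length
decreasing_by all_goals (simp; try omega)

def map_letters_by_frequency_alt (s1 : String) (s2 : String) : String :=
  let p1 := PySem.List.sorted2 (PySem.Dict.counter s1.toList).items
    (fun kv => -kv.2) (fun kv => kv.1)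
  let p2 := PySem.List.sorted2 (PySem.Dict.counter s2.toList).items
    (fun kv => -kv.2) (fun kv => kv.1)
  pvMergeB p1 p2 [] false

-- ===== PRECONDITION & SPEC =====
def Spec_map_letters_by_frequency (s1 : String) (s2 : String) (out : String) : Prop := out = map_letters_by_frequency_alt s1 s2
instance (s1 : String) (s2 : String) (out : String) : Decidable (Spec_map_letters_by_frequency s1 s2 out) := by unfold Spec_map_letters_by_frequency; infer_instance

-- ===== CLAIM (what is proved, stated in full; the proofs are below) =====
def Claim_equal_map_letters_by_frequency : Prop := ∀ (s1 : String) (s2 : String), Dom_map_letters_by_frequency s1 s2 → Spec_map_letters_by_frequency s1 s2 (map_letters_by_frequency s1 s2)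

-- ===== LEMMAS AND PROOFS =====

-- canonical descriptions of a string's counter
def cItems (s : String) : List (Char × Int) := (PySem.Dict.counter s.toList).items
def cVals (s : String) : List Int := (cItems s).map (·.2)
-- distinct frequencies, descending
def cF (s : String) : List Int :=
  PySem.List.sorted (PySem.Set.ofList (cVals s)) (fun x => x) true
-- the letters of frequency f, ascending
def cL (s : String) (f : Int) : List Char :=
  PySem.List.sorted (((cItems s).filter (fun kv => kv.2 == f)).map (·.1)) (fun x => x) false
-- the (letter,count) pairs of the frequencies fs, letters L f per block, flattened
def pvFlat (fs : List Int) (L : Int → List Char) : List (Char × Int) :=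
  fs.flatMap (fun f => (L f).map (fun x => (x, f)))
-- A's loop and B's merge both reduce to this abstract scan over common frequencies
def pvAbs (L1 L2 : Int → List Char) : List Int → List String → Bool → String
  | [], acc, b => if b then pvMsgMis else PySem.Str.join " " acc
  | f :: fs, acc, b =>
    if (L1 f).length ≠ (L2 f).length then pvMsgAmb
    else pvAbs L1 L2 fs
      (acc ++ ((L1 f).zip (L2 f)).map (fun xy => String.ofList [xy.1, '=', xy.2])) b
-- intersection of two strictly descending lists, merge style
def pvInter : List Int → List Int → List Int
  | [], _ => []
  | _ :: _, [] => []
  | f1 :: r1, f2 :: r2 =>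
    if f1 = f2 then f1 :: pvInter r1 r2
    else if f1 > f2 then pvInter r1 (f2 :: r2)
    else pvInter (f1 :: r1) r2
termination_by a b => a.length + b.length

lemma lettersD_getD (l : List (Char × Int)) (f : Int) :
    (l.foldl (fun d kv => d.modify kv.2 [] (· ++ [kv.1])) PySem.Dict.empty).getD f []
      = (l.filter (fun kv => kv.2 == f)).map (·.1) := by
  have h : l.foldl (fun d kv => d.modify kv.2 [] (· ++ [kv.1])) PySem.Dict.empty
      = (l.map (fun kv => (kv.2, kv.1))).foldl
          (fun d p => d.modify p.1 [] (· ++ [p.2])) PySem.Dict.empty := by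
    rw [List.foldl_map]
  rw [h, PySem.Dict.getD_foldl_modify_append]
  simp [List.filter_map, List.map_map, Function.comp_def]

lemma lettersD_keys (l : List (Char × Int)) :
    (l.foldl (fun d kv => d.modify kv.2 [] (· ++ [kv.1])) PySem.Dict.empty).keys
      = PySem.Set.ofList (l.map (·.2)) := by
  rw [PySem.Dict.keys_foldl_modify_key (key := fun kv : Char × Int => kv.2)]
  simp [PySem.Dict.keys_empty, PySem.Set.update_nil_left]

lemma mem_cF (s : String) (f : Int) : f ∈ cF s ↔ f ∈ cVals s := by
  unfold cF
  rw [PySem.List.mem_sorted, PySem.Set.mem_ofList]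

lemma cF_nodup (s : String) : (cF s).Nodup :=
  (PySem.List.sorted_perm _ _ _).nodup_iff.mpr (PySem.Set.nodup_ofList _)

lemma cF_pairwise (s : String) : (cF s).Pairwise (· > ·) := by
  have h1 : (cF s).Pairwise (fun a b => b ≤ a) := by
    have := PySem.List.sorted_pairwise_rev (xs := PySem.Set.ofList (cVals s))
      (key := fun x : Int => x)
    exact this
  have h2 : (cF s).Pairwise (fun a b : Int => a ≠ b) := cF_nodup s
  exact (h1.and h2).imp (fun h => lt_of_le_of_ne h.1 (Ne.symm h.2))

lemma cKeys_nodup (s : String) : ((cItems s).map (·.1)).Nodup := by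
  unfold cItems
  rw [PySem.Dict.items_counter]
  simp only [List.map_map, Function.comp_def, List.map_id']
  exact PySem.Set.nodup_ofList s.toList

lemma cL_nodup (s : String) (f : Int) : (cL s f).Nodup := by
  unfold cL
  refine (PySem.List.sorted_perm _ _ _).nodup_iff.mpr ?_
  exact List.Sublist.nodup (List.Sublist.map Prod.fst List.filter_sublist) (cKeys_nodup s)

lemma cL_pairwise (s : String) (f : Int) : (cL s f).Pairwise (· < ·) := by
  have h1 : (cL s f).Pairwise (fun a b => a ≤ b) := by
    have := PySem.List.sorted_pairwise
      (xs := ((cItems s).filter (fun kv => kv.2 == f)).map (·.1)) (key := fun x : Char => x)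
    exact this
  have h2 : (cL s f).Pairwise (fun a b : Char => a ≠ b) := cL_nodup s f
  exact (h1.and h2).imp (fun h => lt_of_le_of_ne h.1 h.2)

lemma cL_ne_nil (s : String) (f : Int) (h : f ∈ cVals s) : cL s f ≠ [] := by
  unfold cL
  rw [Ne, PySem.List.sorted_eq_nil_iff]
  rcases List.mem_map.mp h with ⟨kv, hkv, rfl⟩
  intro hnil
  have : kv ∈ (cItems s).filter (fun kv' => kv'.2 == kv.2) :=
    List.mem_filter.mpr ⟨hkv, by simp⟩
  rw [List.map_eq_nil_iff] at hnil
  rw [hnil] at this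
  simp at this

-- sorted2 by (-count, letter) IS sorted by the lexicographic key
lemma sorted2_lex (xs : List (Char × Int)) :
    PySem.List.sorted2 xs (fun kv => -kv.2) (fun kv => kv.1)
      = PySem.List.sorted xs (fun kv => toLex ((-kv.2 : Int), kv.1)) false := by
  have hfun : (fun (a b : Char × Int) =>
        decide (-a.2 < -b.2) || (!decide (-b.2 < -a.2) && decide (a.1 < b.1)))
      = fun (a b : Char × Int) =>
        decide (toLex ((-a.2 : Int), a.1) < toLex ((-b.2 : Int), b.1)) := by
    funext a b
    rcases lt_trichotomy (-a.2 : Int) (-b.2) with h | h | h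
    · simp [Prod.Lex.lt_iff, h]
    · simp [Prod.Lex.lt_iff, h]
    · simp [Prod.Lex.lt_iff, h, asymm h, ne_of_gt h]
  show List.foldl (fun acc x => PySem.List.insertBy
      (fun (a b : Char × Int) =>
        decide (-a.2 < -b.2) || (!decide (-b.2 < -a.2) && decide (a.1 < b.1))) x acc) [] xs = _
  rw [PySem.List.sorted_eq_foldl_insertBy, hfun]

lemma perm_flatMap_filter (fs : List Int) :
    ∀ (l : List (Char × Int)), fs.Nodup → (∀ kv ∈ l, kv.2 ∈ fs) →
      (fs.flatMap (fun f => l.filter (fun kv => kv.2 == f))).Perm l := by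
  induction fs with
  | nil =>
    intro l _ hcov
    have : l = [] := List.eq_nil_iff_forall_not_mem.mpr (fun kv hkv => by simpa using hcov kv hkv)
    simp [this]
  | cons f rest ih =>
    intro l hnd hcov
    rcases List.nodup_cons.mp hnd with ⟨hf, hnd'⟩
    have hsub : ∀ g ∈ rest, l.filter (fun kv => kv.2 == g)
        = (l.filter (fun kv => !(kv.2 == f))).filter (fun kv => kv.2 == g) := by
      intro g hg
      rw [List.filter_filter]
      apply List.filter_congr
      intro kv _
      by_cases h : kv.2 = g
      · have hgf : g ≠ f := fun hh => hf (hh ▸ hg)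
        simp [h, hgf]
      · simp [h]
    have hperm2 : (rest.flatMap (fun f => l.filter (fun kv => kv.2 == f))).Perm
        (l.filter (fun kv => !(kv.2 == f))) := by
      have hih := ih (l.filter (fun kv => !(kv.2 == f))) hnd'
        (fun kv hkv => by
          rcases List.mem_filter.mp hkv with ⟨hkv', hne⟩
          rcases List.mem_cons.mp (hcov kv hkv') with h | h
          · simp_all
          · exact h)
      rw [List.flatMap_congr hsub]
      exact hih
    refine List.Perm.trans ?_ (List.filter_append_perm (fun kv => kv.2 == f) l)
    rw [List.flatMap_cons]
    exact List.Perm.append_left _ hperm2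

lemma flatMap_perm_congr {α β : Type} (fs : List α) (g h : α → List β)
    (H : ∀ a ∈ fs, (g a).Perm (h a)) : (fs.flatMap g).Perm (fs.flatMap h) := by
  induction fs with
  | nil => simp
  | cons a rest ih =>
    rw [List.flatMap_cons, List.flatMap_cons]
    exact (H a (List.mem_cons_self)).append (ih (fun a ha => H a (List.mem_cons_of_mem _ ha)))

lemma flat_perm_items (s : String) : (pvFlat (cF s) (cL s)).Perm (cItems s) := by
  have hblock : ∀ f ∈ cF s,
      ((cL s f).map (fun x => (x, f))).Perm ((cItems s).filter (fun kv => kv.2 == f)) := by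
    intro f _
    have h1 : (cL s f).Perm (((cItems s).filter (fun kv => kv.2 == f)).map (·.1)) :=
      PySem.List.sorted_perm _ _ _
    have h2 := h1.map (fun x => (x, f))
    refine h2.trans ?_
    rw [List.map_map]
    have heq : ∀ kv ∈ (cItems s).filter (fun kv => kv.2 == f),
        ((fun x => (x, f)) ∘ (·.1)) kv = kv := by
      intro kv hkv
      have := (List.mem_filter.mp hkv).2
      simp only [beq_iff_eq] at this
      simp [← this]
    rw [List.map_congr_left heq]
    simp
  refine (flatMap_perm_congr _ _ _ hblock).trans ?_
  exact perm_flatMap_filter (cF s) (cItems s) (cF_nodup s)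
    (fun kv hkv => (mem_cF s kv.2).mpr (List.mem_map.mpr ⟨kv, hkv, rfl⟩))

lemma flat_pairwise (s : String) :
    (pvFlat (cF s) (cL s)).Pairwise
      (fun a b => toLex ((-a.2 : Int), a.1) < toLex ((-b.2 : Int), b.1)) := by
  unfold pvFlat
  rw [List.pairwise_flatMap]
  constructor
  · intro f _
    rw [List.pairwise_map]
    exact (cL_pairwise s f).imp (fun h => by
      rw [Prod.Lex.lt_iff]
      exact Or.inr ⟨rfl, h⟩)
  · refine (cF_pairwise s).imp ?_
    intro f1 f2 hgt x hx y hy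
    rcases List.mem_map.mp hx with ⟨a, _, rfl⟩
    rcases List.mem_map.mp hy with ⟨b, _, rfl⟩
    rw [Prod.Lex.lt_iff]
    exact Or.inl (by simpa using hgt)

lemma sorted2_eq_flat (s : String) :
    PySem.List.sorted2 (cItems s) (fun kv => -kv.2) (fun kv => kv.1)
      = pvFlat (cF s) (cL s) := by
  rw [sorted2_lex]
  exact PySem.List.sorted_eq_of_perm_of_pairwise_lt _ _ _ (flat_perm_items s) (flat_pairwise s)

-- ---- merge lemmas ----

lemma mem_flat_snd (fs : List Int) (L : Int → List Char) (kv : Char × Int)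
    (h : kv ∈ pvFlat fs L) : kv.2 ∈ fs := by
  unfold pvFlat at h
  rcases List.mem_flatMap.mp h with ⟨f, hf, hkv⟩
  rcases List.mem_map.mp hkv with ⟨x, _, rfl⟩
  exact hf

lemma headFreq_flat (fs : List Int) (L : Int → List Char) (f : Int)
    (h : ∀ g ∈ fs, g ≠ f) : pvHeadFreq (pvFlat fs L) f = false := by
  cases hfl : pvFlat fs L with
  | nil => rfl
  | cons kv t =>
    have hmem : kv ∈ pvFlat fs L := by rw [hfl]; exact List.mem_cons_self
    have := h kv.2 (mem_flat_snd fs L kv hmem)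
    simp [pvHeadFreq, this]

lemma flat_cons (f : Int) (r : List Int) (L : Int → List Char) :
    pvFlat (f :: r) L = (L f).map (fun x => (x, f)) ++ pvFlat r L := by
  simp [pvFlat]

lemma merge_skip (f c2 : Int) (hlt : c2 < f) (y : Char) (t2 : List (Char × Int)) :
    ∀ (l1 : List Char) (t1 : List (Char × Int)) (acc : List String) (mm : Bool), l1 ≠ [] →
      pvMergeB (l1.map (fun x => (x, f)) ++ t1) ((y, c2) :: t2) acc mm
        = pvMergeB t1 ((y, c2) :: t2) acc true := by
  intro l1
  induction l1 with
  | nil => intro _ _ _ h; exact absurd rfl h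
  | cons x l1' ih =>
    intro t1 acc mm _
    rw [List.map_cons, List.cons_append, pvMergeB]
    have h1 : (f == c2) = false := by simp [ne_of_gt hlt]
    have h2 : f > c2 := hlt
    simp only [h1, Bool.false_eq_true, if_false, h2, if_pos]
    cases l1' with
    | nil => simp
    | cons z l1'' => exact ih t1 acc true (by simp)

lemma merge_skip2 (f c1 : Int) (hlt : c1 < f) (x : Char) (t1 : List (Char × Int)) :
    ∀ (l2 : List Char) (t2 : List (Char × Int)) (acc : List String) (mm : Bool), l2 ≠ [] →
      pvMergeB ((x, c1) :: t1) (l2.map (fun z => (z, f)) ++ t2) acc mm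
        = pvMergeB ((x, c1) :: t1) t2 acc true := by
  intro l2
  induction l2 with
  | nil => intro _ _ _ h; exact absurd rfl h
  | cons z l2' ih =>
    intro t2 acc mm _
    rw [List.map_cons, List.cons_append, pvMergeB]
    have h1 : (c1 == f) = false := by simp [ne_of_lt hlt]
    have h2 : ¬ (c1 > f) := not_lt_of_gt hlt
    simp only [h1, Bool.false_eq_true, if_false, h2, if_false]
    cases l2' with
    | nil => simp
    | cons w l2'' => exact ih t2 acc true (by simp)

lemma merge_block (f : Int) :
    ∀ (l1 l2 : List Char) (t1 t2 : List (Char × Int)) (acc : List String) (mm : Bool),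
      l1 ≠ [] → l2 ≠ [] → pvHeadFreq t1 f = false → pvHeadFreq t2 f = false →
      pvMergeB (l1.map (fun x => (x, f)) ++ t1) (l2.map (fun x => (x, f)) ++ t2) acc mm
        = if l1.length ≠ l2.length then pvMsgAmb
          else pvMergeB t1 t2
            (acc ++ (l1.zip l2).map (fun xy => String.ofList [xy.1, '=', xy.2])) mm := by
  intro l1
  induction l1 with
  | nil => intro _ _ _ _ _ h; exact absurd rfl h
  | cons x l1' ih =>
    intro l2 t1 t2 acc mm _ hl2 ht1 ht2
    cases l2 with
    | nil => exact absurd rfl hl2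
    | cons y l2' =>
      rw [List.map_cons, List.map_cons, List.cons_append, List.cons_append, pvMergeB]
      simp only [beq_self_eq_true, if_pos]
      have hh1 : pvHeadFreq (l1'.map (fun x => (x, f)) ++ t1) f
          = !l1'.isEmpty := by
        cases l1' with
        | nil => simpa [pvHeadFreq] using ht1
        | cons a b => simp [pvHeadFreq]
      have hh2 : pvHeadFreq (l2'.map (fun x => (x, f)) ++ t2) f
          = !l2'.isEmpty := by
        cases l2' with
        | nil => simpa [pvHeadFreq] using ht2
        | cons a b => simp [pvHeadFreq]
      rw [hh1, hh2]
      cases l1' with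
      | nil =>
        cases l2' with
        | nil => simp
        | cons b l2'' => simp
      | cons a l1'' =>
        cases l2' with
        | nil => simp
        | cons b l2'' =>
          simp only [List.isEmpty_cons, Bool.not_false, bne_self_eq_false,
            Bool.false_eq_true, if_false]
          rw [ih (b :: l2'') t1 t2 (acc ++ [String.ofList [x, '=', y]]) mm
            (by simp) (by simp) ht1 ht2]
          by_cases hlen : (a :: l1'').length = (b :: l2'').length
          · rw [if_neg (by simpa using hlen), if_neg (by simp [hlen])]
            simp [List.zip_cons_cons]
          · rw [if_pos (by simpa using hlen),
              if_pos (by simp only [List.length_cons] at hlen ⊢; omega)]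

lemma merge_eq_abs (L1 L2 : Int → List Char) :
    ∀ (fs1 fs2 : List Int), fs1.Pairwise (· > ·) → fs2.Pairwise (· > ·) →
      (∀ f ∈ fs1, L1 f ≠ []) → (∀ f ∈ fs2, L2 f ≠ []) →
      ∀ (acc : List String) (mm : Bool),
        pvMergeB (pvFlat fs1 L1) (pvFlat fs2 L2) acc mm
          = pvAbs L1 L2 (pvInter fs1 fs2) acc (mm || decide (fs1 ≠ fs2)) := by
  intro fs1 fs2
  induction fs1, fs2 using pvInter.induct with
  | case1 fs2 =>
    intro _ _ _ hne2 acc mm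
    cases fs2 with
    | nil => simp [pvFlat, pvMergeB, pvInter, pvAbs]
    | cons f2 r2 =>
      have : L2 f2 ≠ [] := hne2 f2 (List.mem_cons_self)
      cases hL : L2 f2 with
      | nil => exact absurd hL this
      | cons y ys =>
        simp [pvFlat, pvMergeB, pvInter, pvAbs, hL]
  | case2 f1 r1 =>
    intro _ _ hne1 _ acc mm
    have : L1 f1 ≠ [] := hne1 f1 (List.mem_cons_self)
    cases hL : L1 f1 with
    | nil => exact absurd hL this
    | cons x xs =>
      simp [pvFlat, pvMergeB, pvInter, pvAbs, hL]
  | case3 r1 f2 r2 ih =>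
    -- equal head frequencies
    intro hd1 hd2 hne1 hne2 acc mm
    rw [flat_cons, flat_cons, merge_block f2 (L1 f2) (L2 f2) _ _ acc mm
      (hne1 f2 List.mem_cons_self) (hne2 f2 List.mem_cons_self)
      (headFreq_flat r1 L1 f2
        (fun g hg => ne_of_lt (List.rel_of_pairwise_cons hd1 hg)))
      (headFreq_flat r2 L2 f2
        (fun g hg => ne_of_lt (List.rel_of_pairwise_cons hd2 hg)))]
    have hInter : pvInter (f2 :: r1) (f2 :: r2) = f2 :: pvInter r1 r2 := by
      simp [pvInter]
    rw [hInter]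
    have hb : (decide ((f2 :: r1) ≠ (f2 :: r2))) = decide (r1 ≠ r2) := by
      simp
    rw [hb]
    by_cases hlen : (L1 f2).length = (L2 f2).length
    · rw [if_neg (by simpa using hlen)]
      show _ = pvAbs L1 L2 (f2 :: pvInter r1 r2) acc (mm || decide (r1 ≠ r2))
      rw [pvAbs]
      rw [if_neg (by simpa using hlen)]
      exact ih hd1.of_cons hd2.of_cons
        (fun f hf => hne1 f (List.mem_cons_of_mem _ hf))
        (fun f hf => hne2 f (List.mem_cons_of_mem _ hf)) _ mm
    · rw [if_pos (by simpa using hlen)]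
      rw [pvAbs, if_pos (by simpa using hlen)]
  | case4 f1 r1 f2 r2 hne hgt ih =>
    -- f1 > f2
    intro hd1 hd2 hne1 hne2 acc mm
    cases hL : L2 f2 with
    | nil => exact absurd hL (hne2 f2 List.mem_cons_self)
    | cons y ys =>
      have hflat2 : pvFlat (f2 :: r2) L2 = (y, f2) :: (ys.map (fun x => (x, f2)) ++ pvFlat r2 L2) := by
        simp [flat_cons, hL]
      rw [flat_cons, hflat2,
        merge_skip f1 f2 hgt y _ (L1 f1) _ acc mm (hne1 f1 List.mem_cons_self),
        ← hflat2]
      have hInter : pvInter (f1 :: r1) (f2 :: r2) = pvInter r1 (f2 :: r2) := by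
        rw [pvInter, if_neg hne, if_pos hgt]
      rw [hInter]
      have hb : (mm || decide ((f1 :: r1) ≠ (f2 :: r2))) = true := by
        simp [hne]
      rw [hb]
      have := ih hd1.of_cons hd2
        (fun f hf => hne1 f (List.mem_cons_of_mem _ hf)) hne2 acc true
      simpa using this
  | case5 f1 r1 f2 r2 hne hngt ih =>
    -- f1 < f2
    intro hd1 hd2 hne1 hne2 acc mm
    have hlt : f1 < f2 := lt_of_le_of_ne (not_lt.mp hngt) hne
    cases hL : L1 f1 with
    | nil => exact absurd hL (hne1 f1 List.mem_cons_self)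
    | cons x xs =>
      have hflat1 : pvFlat (f1 :: r1) L1 = (x, f1) :: (xs.map (fun z => (z, f1)) ++ pvFlat r1 L1) := by
        simp [flat_cons, hL]
      rw [flat_cons f2 r2 L2, hflat1,
        merge_skip2 f2 f1 hlt x _ (L2 f2) _ acc mm (hne2 f2 List.mem_cons_self),
        ← hflat1]
      have hInter : pvInter (f1 :: r1) (f2 :: r2) = pvInter (f1 :: r1) r2 := by
        rw [pvInter, if_neg hne, if_neg hngt]
      rw [hInter]
      have hb : (mm || decide ((f1 :: r1) ≠ (f2 :: r2))) = true := by
        simp [hne]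
      rw [hb]
      have := ih hd1 hd2.of_cons hne1
        (fun f hf => hne2 f (List.mem_cons_of_mem _ hf)) acc true
      simpa using this

-- ---- A's loop reduces to the same abstract scan ----

lemma loopA_eq_abs (letters1 letters2 : PySem.Dict Int (List Char))
    (L1 L2 : Int → List Char) (b : Bool)
    (hA1 : ∀ f, PySem.List.sorted (letters1.getD f []) (fun x => x) false = L1 f)
    (hA2 : ∀ f, PySem.List.sorted (letters2.getD f []) (fun x => x) false = L2 f)
    (hbase : (PySem.Set.diff (PySem.Set.ofList letters1.keys) (PySem.Set.ofList letters2.keys) ≠ [] ∨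
              PySem.Set.diff (PySem.Set.ofList letters2.keys) (PySem.Set.ofList letters1.keys) ≠ []) ↔ b = true) :
    ∀ (fs : List Int) (acc : List String),
      pvLoopA letters1 letters2 fs acc = pvAbs L1 L2 fs acc b := by
  intro fs
  induction fs with
  | nil =>
    intro acc
    rw [pvLoopA, pvAbs]
    split_ifs with h1 h2 h2
    · rfl
    · exact absurd (hbase.mp h1) (by simpa using h2)
    · exact absurd (hbase.mpr (by simpa using h2)) h1
    · rfl
  | cons f rest ih =>
    intro acc
    rw [pvLoopA, pvAbs]
    simp only [hA1, hA2]
    by_cases hlen : (L1 f).length = (L2 f).length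
    · rw [if_neg (by simpa using hlen), if_neg (by simpa using hlen)]
      rw [PySem.List.foldl_append_singleton_eq_map]
      exact ih _
    · rw [if_pos (by simpa using hlen), if_pos (by simpa using hlen)]

-- ---- the intersection is A's filtered descending frequency list ----

lemma pvInter_eq_filter :
    ∀ (fs1 fs2 : List Int), fs1.Pairwise (· > ·) → fs2.Pairwise (· > ·) →
      pvInter fs1 fs2 = fs1.filter (fun f => decide (f ∈ fs2)) := by
  intro fs1 fs2
  induction fs1, fs2 using pvInter.induct with
  | case1 fs2 => intro _ _; simp [pvInter]
  | case2 f1 r1 => intro _ _; simp [pvInter]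
  | case3 r1 f2 r2 ih =>
    intro hd1 hd2
    rw [pvInter, if_pos rfl]
    rw [List.filter_cons_of_pos (by simp)]
    rw [ih hd1.of_cons hd2.of_cons]
    congr 1
    apply List.filter_congr
    intro g hg
    have hglt : g < f2 := List.rel_of_pairwise_cons hd1 hg
    simp [List.mem_cons, ne_of_lt hglt]
  | case4 f1 r1 f2 r2 hne hgt ih =>
    intro hd1 hd2
    rw [pvInter, if_neg hne, if_pos hgt, ih hd1.of_cons hd2]
    have hnotmem : f1 ∉ (f2 :: r2) := by
      intro h
      rcases List.mem_cons.mp h with rfl | h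
      · exact hne rfl
      · exact absurd (List.rel_of_pairwise_cons hd2 h) (not_lt_of_gt hgt)
    rw [List.filter_cons_of_neg (by simpa using hnotmem)]
  | case5 f1 r1 f2 r2 hne hngt ih =>
    intro hd1 hd2
    have hlt : f1 < f2 := lt_of_le_of_ne (not_lt.mp hngt) hne
    rw [pvInter, if_neg hne, if_neg hngt, ih hd1 hd2.of_cons]
    apply List.filter_congr
    intro g hg
    have hgle : g ≤ f1 := by
      rcases List.mem_cons.mp hg with rfl | h
      · exact le_refl _
      · exact le_of_lt (List.rel_of_pairwise_cons hd1 h)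
    have hne2 : g ≠ f2 := ne_of_lt (lt_of_le_of_lt hgle hlt)
    simp [List.mem_cons, hne2]

-- ---- frequency-set (mis)match, in both phrasings ----

lemma cF_eq_iff (s1 s2 : String) :
    cF s1 = cF s2 ↔ (∀ f, f ∈ cVals s1 ↔ f ∈ cVals s2) := by
  constructor
  · intro h f
    rw [← mem_cF, ← mem_cF, h]
  · intro h
    have hperm : (cF s2).Perm (PySem.Set.ofList (cVals s1)) := by
      refine (PySem.List.sorted_perm _ _ _).trans ?_
      rw [List.perm_ext_iff_of_nodup (PySem.Set.nodup_ofList _) (PySem.Set.nodup_ofList _)]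
      intro f
      rw [PySem.Set.mem_ofList, PySem.Set.mem_ofList]
      exact (h f).symm
    have hs := PySem.List.sorted_rev_eq_of_perm_of_pairwise_gt _ _ _ hperm (cF_pairwise s2)
    unfold cF at hs ⊢
    exact hs

lemma base_iff (s1 s2 : String) :
    (PySem.Set.diff (PySem.Set.ofList (cVals s1)) (PySem.Set.ofList (cVals s2)) ≠ [] ∨
     PySem.Set.diff (PySem.Set.ofList (cVals s2)) (PySem.Set.ofList (cVals s1)) ≠ []) ↔
    (decide (cF s1 ≠ cF s2) = true) := by
  rw [decide_eq_true_iff]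
  have hdiff : ∀ (a b : String),
      PySem.Set.diff (PySem.Set.ofList (cVals a)) (PySem.Set.ofList (cVals b)) ≠ [] ↔
      ∃ x, x ∈ cVals a ∧ x ∉ cVals b := by
    intro a b
    constructor
    · intro h
      rcases List.exists_mem_of_ne_nil _ h with ⟨x, hx⟩
      rw [PySem.Set.mem_diff, PySem.Set.mem_ofList, PySem.Set.mem_ofList] at hx
      exact ⟨x, hx⟩
    · rintro ⟨x, hx1, hx2⟩ hnil
      have hx : x ∈ PySem.Set.diff (PySem.Set.ofList (cVals a)) (PySem.Set.ofList (cVals b)) := by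
        rw [PySem.Set.mem_diff, PySem.Set.mem_ofList, PySem.Set.mem_ofList]
        exact ⟨hx1, hx2⟩
      rw [hnil] at hx
      simp at hx
  rw [hdiff s1 s2, hdiff s2 s1, Ne, cF_eq_iff]
  constructor
  · rintro (⟨x, hx1, hx2⟩ | ⟨x, hx1, hx2⟩) hall
    · exact hx2 ((hall x).mp hx1)
    · exact hx2 ((hall x).mpr hx1)
  · intro h
    by_contra hno
    push Not at hno
    exact h (fun x => ⟨fun hx1 => hno.1 x hx1, fun hx2 => hno.2 x hx2⟩)

lemma freqPairs_eq (s1 s2 : String) :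
    PySem.List.sorted
        (PySem.Set.inter (PySem.Set.ofList (cVals s1)) (PySem.Set.ofList (cVals s2)))
        (fun x => x) true
      = (cF s1).filter (fun f => decide (f ∈ cVals s2)) := by
  apply PySem.List.sorted_rev_eq_of_perm_of_pairwise_gt
  · rw [List.perm_ext_iff_of_nodup
      (((cF_pairwise s1).filter _).imp (fun h => ne_of_gt h))
      (PySem.Set.nodup_inter _ _ (PySem.Set.nodup_ofList _))]
    intro f
    rw [List.mem_filter, PySem.Set.mem_inter, PySem.Set.mem_ofList, PySem.Set.mem_ofList,
      mem_cF, decide_eq_true_iff]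
  · exact (cF_pairwise s1).filter _

-- ---- assembly ----

lemma main_eq (s1 s2 : String) :
    map_letters_by_frequency s1 s2 = map_letters_by_frequency_alt s1 s2 := by
  unfold map_letters_by_frequency map_letters_by_frequency_alt
  dsimp only
  have h1 : PySem.List.sorted
      (PySem.Set.inter
        (PySem.Set.ofList ((PySem.Dict.counter s1.toList).items.foldl
          (fun d kv => d.modify kv.2 [] (· ++ [kv.1])) PySem.Dict.empty).keys)
        (PySem.Set.ofList ((PySem.Dict.counter s2.toList).items.foldl
          (fun d kv => d.modify kv.2 [] (· ++ [kv.1])) PySem.Dict.empty).keys))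
      (fun x => x) true
      = (cF s1).filter (fun f => decide (f ∈ cVals s2)) := by
    rw [lettersD_keys, lettersD_keys, PySem.Set.ofList_ofList, PySem.Set.ofList_ofList]
    exact freqPairs_eq s1 s2
  rw [h1]
  rw [loopA_eq_abs _ _ (cL s1) (cL s2) (decide (cF s1 ≠ cF s2))
    (fun f => by rw [lettersD_getD]; rfl)
    (fun f => by rw [lettersD_getD]; rfl)
    (by rw [lettersD_keys, lettersD_keys, PySem.Set.ofList_ofList, PySem.Set.ofList_ofList]
        exact base_iff s1 s2)]
  rw [show (PySem.Dict.counter s1.toList).items = cItems s1 from rfl,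
    show (PySem.Dict.counter s2.toList).items = cItems s2 from rfl,
    sorted2_eq_flat s1, sorted2_eq_flat s2]
  rw [merge_eq_abs (cL s1) (cL s2) (cF s1) (cF s2) (cF_pairwise s1) (cF_pairwise s2)
    (fun f hf => cL_ne_nil s1 f ((mem_cF s1 f).mp hf))
    (fun f hf => cL_ne_nil s2 f ((mem_cF s2 f).mp hf))]
  rw [pvInter_eq_filter (cF s1) (cF s2) (cF_pairwise s1) (cF_pairwise s2)]
  rw [Bool.false_or]
  have hfil : (cF s1).filter (fun f => decide (f ∈ cF s2))
      = (cF s1).filter (fun f => decide (f ∈ cVals s2)) := by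
    apply List.filter_congr
    intro f _
    rw [decide_eq_decide]
    exact mem_cF s2 f
  rw [hfil]

-- ===== VERDICT (by name: the statement is the Claim_ definition above) =====
theorem map_letters_by_frequency_spec : Claim_equal_map_letters_by_frequency := by
  intro s1 s2 _
  unfold Spec_map_letters_by_frequency
  exact main_eq s1 s2
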